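-- pv_equiv track=rewrite | github.com/galikechichian/BlackoutMath | blackout_math.py | get_ops
-- ===== SOURCE A (Python) =====
-- OPERATIONS = ['^', 'x', '/', '+', '-']
--
-- def get_ops(tokens):
--     ops = []
--     for token in tokens:
--         if (token in OPERATIONS) and (token not in ops):
--             # highest precedence
--             if token == '^':
--                 ops = [token] + ops
--             # careful here:
--             elif token == 'x' or token == '/':
--                 if len(ops) == 0 or (len(ops) == 1 and ops[0] in ['^', 'x', '/']):
--                     ops.append(token)
--                 elif ops[0] in ['+', '-']:
--                     ops = [token] + ops
--                 else:
--                     for i in range(len(ops)):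
--                         if ops[i] in ['+', '-']:
--                             before = ops[:i]
--                             after = ops[i:]
--                             ops = before + [token] + after
--                             break
--             # either + or -, easy
--             else:
--                 ops.append(token)
--     return ops
-- ===== SOURCE B (Python) =====
-- OPERATIONS = ['^', 'x', '/', '+', '-']
--
-- def _prec(op):
--     return 0 if op == '^' else (1 if op in ('x', '/') else 2)
--
-- def get_ops(tokens):
--     seen = []
--     for token in tokens:
--         if token in OPERATIONS and token not in seen:
--             seen.append(token)
--     return sorted(seen, key=_prec)
-- ===== Notes on version B (the rewrite author's own statement) =====
-- stated objective: simpler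
-- what changed: Replaced A's online insertion-into-precedence-position (with a hand-written positional insert loop) by a two-pass collect-first-occurrences-then-stable-sort-by-precedence; the stable sort reproduces A's within-precedence first-appearance order.
-- intended difference: On token lists where some t in {'x','/'} occurs and every occurrence of t is preceded by '^' and the other of {'x','/'} but by no '+' or '-', A's insertion loop finds no '+'/'-' position and silently drops t (on the witness ['^', 'x', '/'] A omits the final '/'), while B returns the full precedence-sorted operator list including t, which is the intended value. — e.g. on get_ops(["^", "x", "/"]): A returns ["^", "x"], B returns ["^", "x", "/"]
import Mathlib
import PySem

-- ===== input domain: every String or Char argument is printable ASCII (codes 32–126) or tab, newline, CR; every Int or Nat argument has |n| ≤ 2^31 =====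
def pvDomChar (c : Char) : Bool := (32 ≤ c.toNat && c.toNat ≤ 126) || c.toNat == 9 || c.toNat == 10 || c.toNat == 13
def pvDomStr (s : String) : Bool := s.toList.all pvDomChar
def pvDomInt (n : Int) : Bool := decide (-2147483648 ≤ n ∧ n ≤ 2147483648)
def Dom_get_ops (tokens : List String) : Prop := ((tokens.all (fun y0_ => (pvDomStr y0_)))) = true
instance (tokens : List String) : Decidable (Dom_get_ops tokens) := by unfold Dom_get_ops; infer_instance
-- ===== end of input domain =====

-- B replaces A's online insertion-into-precedence-position by collect-first-occurrences then
-- stable-sort-by-precedence (objective: simpler). On inputs in D_get_ops below, A silently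
-- drops an operator; B returns the intended full list.

-- ===== PORT A =====
def OPERATIONS : List String := ["^", "x", "/", "+", "-"]

-- the inner "for i in range(len(ops)): if ops[i] in ['+','-']: ops = ops[:i]+[token]+ops[i:]; break";
-- structural recursion on the remaining iteration count fuel = len - i (so i stays < len, making
-- `ops.getD i ""` exactly Python's ops[i] on every reached iteration)
def insertLoopAux (token : String) (ops : List String) (i : Nat) : Nat → List String
  | 0 => ops
  | n + 1 =>
    if ops.getD i "" ∈ (["+", "-"] : List String) then ops.take i ++ [token] ++ ops.drop i
    else insertLoopAux token ops (i + 1) n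

def insertLoop (token : String) (ops : List String) : List String :=
  insertLoopAux token ops 0 ops.length

-- the body of A's "for token in tokens" loop
def stepA (ops : List String) (token : String) : List String :=
  if token ∈ OPERATIONS ∧ token ∉ ops then
    if token = "^" then token :: ops
    else if token = "x" ∨ token = "/" then
      -- `ops[0]` below is `ops.headD ""`: Python's short-circuit guarantees ops ≠ [] there,
      -- and "" is in neither membership list, so this is exact
      if ops.length = 0 ∨ (ops.length = 1 ∧ ops.headD "" ∈ (["^", "x", "/"] : List String)) then
        ops ++ [token]
      else if ops.headD "" ∈ (["+", "-"] : List String) then token :: ops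
      else insertLoop token ops
    else ops ++ [token]
  else ops

def get_ops (tokens : List String) : List String := tokens.foldl stepA []

-- ===== PORT B =====
def prec (op : String) : Int := if op = "^" then 0 else if op = "x" ∨ op = "/" then 1 else 2

def bstep (seen : List String) (token : String) : List String :=
  if token ∈ OPERATIONS ∧ token ∉ seen then seen ++ [token] else seen

def get_ops_alt (tokens : List String) : List String :=
  PySem.List.sorted (tokens.foldl bstep []) prec false

-- ===== PRECONDITION & SPEC =====
-- On token lists where some t ∈ {"x","/"} occurs and EVERY occurrence of t is preceded by "^"
-- and by the other of {"x","/"} but by no "+" or "-", A silently drops t from its result (its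
-- insertion loop finds no "+"/"-" position and never inserts), e.g. A ["^","x","/"] = ["^","x"];
-- B returns the full precedence-sorted operator list ["^","x","/"], which is the intended value.
def otherOf (t : String) : String := if t = "x" then "/" else "x"

-- left-to-right scan over the INPUT only; state (sh, so, sp, alive, occ):
-- sh/so/sp = "^" / otherOf t / "+" or "-" occurred so far; occ = some occurrence of t was
-- drop-shaped; alive = every occurrence of t so far was drop-shaped
def adStep (t : String) (fl : Bool × Bool × Bool × Bool × Bool) (u : String) :
    Bool × Bool × Bool × Bool × Bool :=
  let p := if u = t then (if fl.1 && fl.2.1 && !fl.2.2.1 then (fl.2.2.2.1, true)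
                          else (false, fl.2.2.2.2))
           else (fl.2.2.2.1, fl.2.2.2.2)
  (fl.1 || (u == "^"), fl.2.1 || (u == otherOf t),
   fl.2.2.1 || (u == "+") || (u == "-"), p.1, p.2)

def dropped (t : String) (tokens : List String) : Bool :=
  (tokens.foldl (adStep t) (false, false, false, true, false)).2.2.2.1 &&
  (tokens.foldl (adStep t) (false, false, false, true, false)).2.2.2.2

def D_get_ops (tokens : List String) : Prop :=
  dropped "x" tokens = true ∨ dropped "/" tokens = true
instance (tokens : List String) : Decidable (D_get_ops tokens) := by unfold D_get_ops; infer_instance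

def Spec_get_ops (tokens : List String) (out : List String) : Prop :=
  ¬ D_get_ops tokens → out = get_ops_alt tokens
instance (tokens : List String) (out : List String) : Decidable (Spec_get_ops tokens out) := by
  unfold Spec_get_ops; infer_instance

def pvDiffWitness_get_ops : List String := ["^", "x", "/"]
def pvDiffWitnessOut_get_ops : (List String) × (List String) := (["^", "x"], ["^", "x", "/"])

-- ===== CLAIM (what is proved, stated in full; the proofs are below) =====
def Claim_unchanged_get_ops : Prop :=
  ∀ (tokens : List String), Dom_get_ops tokens → Spec_get_ops tokens (get_ops tokens)
def Claim_changed_get_ops : Prop :=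
  Dom_get_ops (pvDiffWitness_get_ops) ∧ D_get_ops (pvDiffWitness_get_ops) ∧
  get_ops (pvDiffWitness_get_ops) = pvDiffWitnessOut_get_ops.1 ∧
  get_ops_alt (pvDiffWitness_get_ops) = pvDiffWitnessOut_get_ops.2 ∧
  pvDiffWitnessOut_get_ops.1 ≠ pvDiffWitnessOut_get_ops.2
def Claim_exact_get_ops : Prop :=
  ∀ (tokens : List String), Dom_get_ops tokens → D_get_ops tokens →
    get_ops tokens ≠ get_ops_alt tokens

-- ===== LEMMAS AND PROOFS =====

-- Finite abstraction of A's loop state: only the five operator strings matter.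
inductive PvOp : Type
  | pow | mul | div | add | sub
deriving DecidableEq, Repr

def PvOp.toStr : PvOp → String
  | .pow => "^" | .mul => "x" | .div => "/" | .add => "+" | .sub => "-"

def toOp? (u : String) : Option PvOp :=
  if u = "^" then some .pow else if u = "x" then some .mul else if u = "/" then some .div
  else if u = "+" then some .add else if u = "-" then some .sub else none

-- machine state: (seen in first-occurrence order, pending dropped op, alive/occ for "x", for "/")
abbrev PvState : Type := List PvOp × Option PvOp × Bool × Bool × Bool × Bool

def otherE : PvOp → PvOp
  | .mul => .div | .div => .mul | o => o

def adE (t : PvOp) (seen : List PvOp) (alive occ : Bool) (u : PvOp) : Bool × Bool :=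
  if u = t then
    (if seen.contains .pow && seen.contains (otherE t) &&
        !(seen.contains .add || seen.contains .sub) then (alive, true) else (false, occ))
  else (alive, occ)

def stepF (s : PvState) (u : PvOp) : PvState :=
  let seen := s.1
  let pend := s.2.1
  let x := adE .mul seen s.2.2.1 s.2.2.2.1 u
  let d := adE .div seen s.2.2.2.2.1 s.2.2.2.2.2 u
  if pend = some u then
    (seen, if seen.contains .add || seen.contains .sub then none else pend, x.1, x.2, d.1, d.2)
  else if u ∈ seen then (seen, pend, x.1, x.2, d.1, d.2)
  else if (u = .mul ∨ u = .div) ∧ pend = none ∧ .pow ∈ seen ∧ otherE u ∈ seen ∧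
          ¬(.add ∈ seen ∨ .sub ∈ seen) then
    (seen ++ [u], some u, x.1, x.2, d.1, d.2)
  else (seen ++ [u], pend, x.1, x.2, d.1, d.2)

def stepFS (s : PvState) (u : String) : PvState :=
  match toOp? u with
  | some o => stepF s o
  | none => s

def opsOf (s : PvState) : List String :=
  PySem.List.sorted ((match s.2.1 with | some t => s.1.erase t | none => s.1).map PvOp.toStr)
    prec false

def seenStrOf (s : PvState) : List String := s.1.map PvOp.toStr

def flagsX (s : PvState) : Bool × Bool × Bool × Bool × Bool :=
  (s.1.contains .pow, s.1.contains .div,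
   s.1.contains .add || s.1.contains .sub, s.2.2.1, s.2.2.2.1)

def flagsD (s : PvState) : Bool × Bool × Bool × Bool × Bool :=
  (s.1.contains .pow, s.1.contains .mul,
   s.1.contains .add || s.1.contains .sub, s.2.2.2.2.1, s.2.2.2.2.2)

def allOpsE : List PvOp := [.pow, .mul, .div, .add, .sub]

def ReachL : List PvState := [
  ([], none, true, false, true, false),
  ([.add], none, true, false, true, false),
  ([.sub], none, true, false, true, false),
  ([.div], none, true, false, false, false),
  ([.pow], none, true, false, true, false),
  ([.mul], none, false, false, true, false),
  ([.add, .sub], none, true, false, true, false),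
  ([.add, .div], none, true, false, false, false),
  ([.add, .pow], none, true, false, true, false),
  ([.add, .mul], none, false, false, true, false),
  ([.sub, .add], none, true, false, true, false),
  ([.sub, .div], none, true, false, false, false),
  ([.sub, .pow], none, true, false, true, false),
  ([.sub, .mul], none, false, false, true, false),
  ([.div, .add], none, true, false, false, false),
  ([.div, .sub], none, true, false, false, false),
  ([.div, .pow], none, true, false, false, false),
  ([.div, .mul], none, false, false, false, false),
  ([.pow, .add], none, true, false, true, false),
  ([.pow, .sub], none, true, false, true, false),
  ([.pow, .div], none, true, false, false, false),
  ([.pow, .mul], none, false, false, true, false),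
  ([.mul, .add], none, false, false, true, false),
  ([.mul, .sub], none, false, false, true, false),
  ([.mul, .div], none, false, false, false, false),
  ([.mul, .pow], none, false, false, true, false),
  ([.add, .sub, .div], none, true, false, false, false),
  ([.add, .sub, .pow], none, true, false, true, false),
  ([.add, .sub, .mul], none, false, false, true, false),
  ([.add, .div, .sub], none, true, false, false, false),
  ([.add, .div, .pow], none, true, false, false, false),
  ([.add, .div, .mul], none, false, false, false, false),
  ([.add, .pow, .sub], none, true, false, true, false),
  ([.add, .pow, .div], none, true, false, false, false),
  ([.add, .pow, .mul], none, false, false, true, false),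
  ([.add, .mul, .sub], none, false, false, true, false),
  ([.add, .mul, .div], none, false, false, false, false),
  ([.add, .mul, .pow], none, false, false, true, false),
  ([.sub, .add, .div], none, true, false, false, false),
  ([.sub, .add, .pow], none, true, false, true, false),
  ([.sub, .add, .mul], none, false, false, true, false),
  ([.sub, .div, .add], none, true, false, false, false),
  ([.sub, .div, .pow], none, true, false, false, false),
  ([.sub, .div, .mul], none, false, false, false, false),
  ([.sub, .pow, .add], none, true, false, true, false),
  ([.sub, .pow, .div], none, true, false, false, false),
  ([.sub, .pow, .mul], none, false, false, true, false),
  ([.sub, .mul, .add], none, false, false, true, false),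
  ([.sub, .mul, .div], none, false, false, false, false),
  ([.sub, .mul, .pow], none, false, false, true, false),
  ([.div, .add, .sub], none, true, false, false, false),
  ([.div, .add, .pow], none, true, false, false, false),
  ([.div, .add, .mul], none, false, false, false, false),
  ([.div, .sub, .add], none, true, false, false, false),
  ([.div, .sub, .pow], none, true, false, false, false),
  ([.div, .sub, .mul], none, false, false, false, false),
  ([.div, .pow, .add], none, true, false, false, false),
  ([.div, .pow, .sub], none, true, false, false, false),
  ([.div, .pow, .mul], some .mul, true, true, false, false),
  ([.div, .pow, .mul], some .mul, true, true, false, true),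
  ([.div, .mul, .add], none, false, false, false, false),
  ([.div, .mul, .sub], none, false, false, false, false),
  ([.div, .mul, .pow], none, false, false, false, false),
  ([.div, .mul, .pow], none, false, false, false, true),
  ([.div, .mul, .pow], none, false, true, false, false),
  ([.div, .mul, .pow], none, false, true, false, true),
  ([.pow, .add, .sub], none, true, false, true, false),
  ([.pow, .add, .div], none, true, false, false, false),
  ([.pow, .add, .mul], none, false, false, true, false),
  ([.pow, .sub, .add], none, true, false, true, false),
  ([.pow, .sub, .div], none, true, false, false, false),
  ([.pow, .sub, .mul], none, false, false, true, false),
  ([.pow, .div, .add], none, true, false, false, false),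
  ([.pow, .div, .sub], none, true, false, false, false),
  ([.pow, .div, .mul], some .mul, true, true, false, false),
  ([.pow, .div, .mul], some .mul, true, true, false, true),
  ([.pow, .mul, .add], none, false, false, true, false),
  ([.pow, .mul, .sub], none, false, false, true, false),
  ([.pow, .mul, .div], some .div, false, false, true, true),
  ([.pow, .mul, .div], some .div, false, true, true, true),
  ([.mul, .add, .sub], none, false, false, true, false),
  ([.mul, .add, .div], none, false, false, false, false),
  ([.mul, .add, .pow], none, false, false, true, false),
  ([.mul, .sub, .add], none, false, false, true, false),
  ([.mul, .sub, .div], none, false, false, false, false),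
  ([.mul, .sub, .pow], none, false, false, true, false),
  ([.mul, .div, .add], none, false, false, false, false),
  ([.mul, .div, .sub], none, false, false, false, false),
  ([.mul, .div, .pow], none, false, false, false, false),
  ([.mul, .div, .pow], none, false, false, false, true),
  ([.mul, .div, .pow], none, false, true, false, false),
  ([.mul, .div, .pow], none, false, true, false, true),
  ([.mul, .pow, .add], none, false, false, true, false),
  ([.mul, .pow, .sub], none, false, false, true, false),
  ([.mul, .pow, .div], some .div, false, false, true, true),
  ([.mul, .pow, .div], some .div, false, true, true, true),
  ([.add, .sub, .div, .pow], none, true, false, false, false),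
  ([.add, .sub, .div, .mul], none, false, false, false, false),
  ([.add, .sub, .pow, .div], none, true, false, false, false),
  ([.add, .sub, .pow, .mul], none, false, false, true, false),
  ([.add, .sub, .mul, .div], none, false, false, false, false),
  ([.add, .sub, .mul, .pow], none, false, false, true, false),
  ([.add, .div, .sub, .pow], none, true, false, false, false),
  ([.add, .div, .sub, .mul], none, false, false, false, false),
  ([.add, .div, .pow, .sub], none, true, false, false, false),
  ([.add, .div, .pow, .mul], none, false, false, false, false),
  ([.add, .div, .mul, .sub], none, false, false, false, false),
  ([.add, .div, .mul, .pow], none, false, false, false, false),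
  ([.add, .pow, .sub, .div], none, true, false, false, false),
  ([.add, .pow, .sub, .mul], none, false, false, true, false),
  ([.add, .pow, .div, .sub], none, true, false, false, false),
  ([.add, .pow, .div, .mul], none, false, false, false, false),
  ([.add, .pow, .mul, .sub], none, false, false, true, false),
  ([.add, .pow, .mul, .div], none, false, false, false, false),
  ([.add, .mul, .sub, .div], none, false, false, false, false),
  ([.add, .mul, .sub, .pow], none, false, false, true, false),
  ([.add, .mul, .div, .sub], none, false, false, false, false),
  ([.add, .mul, .div, .pow], none, false, false, false, false),
  ([.add, .mul, .pow, .sub], none, false, false, true, false),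
  ([.add, .mul, .pow, .div], none, false, false, false, false),
  ([.sub, .add, .div, .pow], none, true, false, false, false),
  ([.sub, .add, .div, .mul], none, false, false, false, false),
  ([.sub, .add, .pow, .div], none, true, false, false, false),
  ([.sub, .add, .pow, .mul], none, false, false, true, false),
  ([.sub, .add, .mul, .div], none, false, false, false, false),
  ([.sub, .add, .mul, .pow], none, false, false, true, false),
  ([.sub, .div, .add, .pow], none, true, false, false, false),
  ([.sub, .div, .add, .mul], none, false, false, false, false),
  ([.sub, .div, .pow, .add], none, true, false, false, false),
  ([.sub, .div, .pow, .mul], none, false, false, false, false),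
  ([.sub, .div, .mul, .add], none, false, false, false, false),
  ([.sub, .div, .mul, .pow], none, false, false, false, false),
  ([.sub, .pow, .add, .div], none, true, false, false, false),
  ([.sub, .pow, .add, .mul], none, false, false, true, false),
  ([.sub, .pow, .div, .add], none, true, false, false, false),
  ([.sub, .pow, .div, .mul], none, false, false, false, false),
  ([.sub, .pow, .mul, .add], none, false, false, true, false),
  ([.sub, .pow, .mul, .div], none, false, false, false, false),
  ([.sub, .mul, .add, .div], none, false, false, false, false),
  ([.sub, .mul, .add, .pow], none, false, false, true, false),
  ([.sub, .mul, .div, .add], none, false, false, false, false),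
  ([.sub, .mul, .div, .pow], none, false, false, false, false),
  ([.sub, .mul, .pow, .add], none, false, false, true, false),
  ([.sub, .mul, .pow, .div], none, false, false, false, false),
  ([.div, .add, .sub, .pow], none, true, false, false, false),
  ([.div, .add, .sub, .mul], none, false, false, false, false),
  ([.div, .add, .pow, .sub], none, true, false, false, false),
  ([.div, .add, .pow, .mul], none, false, false, false, false),
  ([.div, .add, .mul, .sub], none, false, false, false, false),
  ([.div, .add, .mul, .pow], none, false, false, false, false),
  ([.div, .sub, .add, .pow], none, true, false, false, false),
  ([.div, .sub, .add, .mul], none, false, false, false, false),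
  ([.div, .sub, .pow, .add], none, true, false, false, false),
  ([.div, .sub, .pow, .mul], none, false, false, false, false),
  ([.div, .sub, .mul, .add], none, false, false, false, false),
  ([.div, .sub, .mul, .pow], none, false, false, false, false),
  ([.div, .pow, .add, .sub], none, true, false, false, false),
  ([.div, .pow, .add, .mul], none, false, false, false, false),
  ([.div, .pow, .sub, .add], none, true, false, false, false),
  ([.div, .pow, .sub, .mul], none, false, false, false, false),
  ([.div, .pow, .mul, .add], some .mul, true, true, false, false),
  ([.div, .pow, .mul, .add], some .mul, true, true, false, true),
  ([.div, .pow, .mul, .add], none, false, true, false, false),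
  ([.div, .pow, .mul, .add], none, false, true, false, true),
  ([.div, .pow, .mul, .sub], some .mul, true, true, false, false),
  ([.div, .pow, .mul, .sub], some .mul, true, true, false, true),
  ([.div, .pow, .mul, .sub], none, false, true, false, false),
  ([.div, .pow, .mul, .sub], none, false, true, false, true),
  ([.div, .mul, .add, .sub], none, false, false, false, false),
  ([.div, .mul, .add, .pow], none, false, false, false, false),
  ([.div, .mul, .sub, .add], none, false, false, false, false),
  ([.div, .mul, .sub, .pow], none, false, false, false, false),
  ([.div, .mul, .pow, .add], none, false, false, false, false),
  ([.div, .mul, .pow, .add], none, false, false, false, true),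
  ([.div, .mul, .pow, .add], none, false, true, false, false),
  ([.div, .mul, .pow, .add], none, false, true, false, true),
  ([.div, .mul, .pow, .sub], none, false, false, false, false),
  ([.div, .mul, .pow, .sub], none, false, false, false, true),
  ([.div, .mul, .pow, .sub], none, false, true, false, false),
  ([.div, .mul, .pow, .sub], none, false, true, false, true),
  ([.pow, .add, .sub, .div], none, true, false, false, false),
  ([.pow, .add, .sub, .mul], none, false, false, true, false),
  ([.pow, .add, .div, .sub], none, true, false, false, false),
  ([.pow, .add, .div, .mul], none, false, false, false, false),
  ([.pow, .add, .mul, .sub], none, false, false, true, false),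
  ([.pow, .add, .mul, .div], none, false, false, false, false),
  ([.pow, .sub, .add, .div], none, true, false, false, false),
  ([.pow, .sub, .add, .mul], none, false, false, true, false),
  ([.pow, .sub, .div, .add], none, true, false, false, false),
  ([.pow, .sub, .div, .mul], none, false, false, false, false),
  ([.pow, .sub, .mul, .add], none, false, false, true, false),
  ([.pow, .sub, .mul, .div], none, false, false, false, false),
  ([.pow, .div, .add, .sub], none, true, false, false, false),
  ([.pow, .div, .add, .mul], none, false, false, false, false),
  ([.pow, .div, .sub, .add], none, true, false, false, false),
  ([.pow, .div, .sub, .mul], none, false, false, false, false),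
  ([.pow, .div, .mul, .add], some .mul, true, true, false, false),
  ([.pow, .div, .mul, .add], some .mul, true, true, false, true),
  ([.pow, .div, .mul, .add], none, false, true, false, false),
  ([.pow, .div, .mul, .add], none, false, true, false, true),
  ([.pow, .div, .mul, .sub], some .mul, true, true, false, false),
  ([.pow, .div, .mul, .sub], some .mul, true, true, false, true),
  ([.pow, .div, .mul, .sub], none, false, true, false, false),
  ([.pow, .div, .mul, .sub], none, false, true, false, true),
  ([.pow, .mul, .add, .sub], none, false, false, true, false),
  ([.pow, .mul, .add, .div], none, false, false, false, false),
  ([.pow, .mul, .sub, .add], none, false, false, true, false),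
  ([.pow, .mul, .sub, .div], none, false, false, false, false),
  ([.pow, .mul, .div, .add], some .div, false, false, true, true),
  ([.pow, .mul, .div, .add], some .div, false, true, true, true),
  ([.pow, .mul, .div, .add], none, false, false, false, true),
  ([.pow, .mul, .div, .add], none, false, true, false, true),
  ([.pow, .mul, .div, .sub], some .div, false, false, true, true),
  ([.pow, .mul, .div, .sub], some .div, false, true, true, true),
  ([.pow, .mul, .div, .sub], none, false, false, false, true),
  ([.pow, .mul, .div, .sub], none, false, true, false, true),
  ([.mul, .add, .sub, .div], none, false, false, false, false),
  ([.mul, .add, .sub, .pow], none, false, false, true, false),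
  ([.mul, .add, .div, .sub], none, false, false, false, false),
  ([.mul, .add, .div, .pow], none, false, false, false, false),
  ([.mul, .add, .pow, .sub], none, false, false, true, false),
  ([.mul, .add, .pow, .div], none, false, false, false, false),
  ([.mul, .sub, .add, .div], none, false, false, false, false),
  ([.mul, .sub, .add, .pow], none, false, false, true, false),
  ([.mul, .sub, .div, .add], none, false, false, false, false),
  ([.mul, .sub, .div, .pow], none, false, false, false, false),
  ([.mul, .sub, .pow, .add], none, false, false, true, false),
  ([.mul, .sub, .pow, .div], none, false, false, false, false),
  ([.mul, .div, .add, .sub], none, false, false, false, false),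
  ([.mul, .div, .add, .pow], none, false, false, false, false),
  ([.mul, .div, .sub, .add], none, false, false, false, false),
  ([.mul, .div, .sub, .pow], none, false, false, false, false),
  ([.mul, .div, .pow, .add], none, false, false, false, false),
  ([.mul, .div, .pow, .add], none, false, false, false, true),
  ([.mul, .div, .pow, .add], none, false, true, false, false),
  ([.mul, .div, .pow, .add], none, false, true, false, true),
  ([.mul, .div, .pow, .sub], none, false, false, false, false),
  ([.mul, .div, .pow, .sub], none, false, false, false, true),
  ([.mul, .div, .pow, .sub], none, false, true, false, false),
  ([.mul, .div, .pow, .sub], none, false, true, false, true),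
  ([.mul, .pow, .add, .sub], none, false, false, true, false),
  ([.mul, .pow, .add, .div], none, false, false, false, false),
  ([.mul, .pow, .sub, .add], none, false, false, true, false),
  ([.mul, .pow, .sub, .div], none, false, false, false, false),
  ([.mul, .pow, .div, .add], some .div, false, false, true, true),
  ([.mul, .pow, .div, .add], some .div, false, true, true, true),
  ([.mul, .pow, .div, .add], none, false, false, false, true),
  ([.mul, .pow, .div, .add], none, false, true, false, true),
  ([.mul, .pow, .div, .sub], some .div, false, false, true, true),
  ([.mul, .pow, .div, .sub], some .div, false, true, true, true),
  ([.mul, .pow, .div, .sub], none, false, false, false, true),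
  ([.mul, .pow, .div, .sub], none, false, true, false, true),
  ([.add, .sub, .div, .pow, .mul], none, false, false, false, false),
  ([.add, .sub, .div, .mul, .pow], none, false, false, false, false),
  ([.add, .sub, .pow, .div, .mul], none, false, false, false, false),
  ([.add, .sub, .pow, .mul, .div], none, false, false, false, false),
  ([.add, .sub, .mul, .div, .pow], none, false, false, false, false),
  ([.add, .sub, .mul, .pow, .div], none, false, false, false, false),
  ([.add, .div, .sub, .pow, .mul], none, false, false, false, false),
  ([.add, .div, .sub, .mul, .pow], none, false, false, false, false),
  ([.add, .div, .pow, .sub, .mul], none, false, false, false, false),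
  ([.add, .div, .pow, .mul, .sub], none, false, false, false, false),
  ([.add, .div, .mul, .sub, .pow], none, false, false, false, false),
  ([.add, .div, .mul, .pow, .sub], none, false, false, false, false),
  ([.add, .pow, .sub, .div, .mul], none, false, false, false, false),
  ([.add, .pow, .sub, .mul, .div], none, false, false, false, false),
  ([.add, .pow, .div, .sub, .mul], none, false, false, false, false),
  ([.add, .pow, .div, .mul, .sub], none, false, false, false, false),
  ([.add, .pow, .mul, .sub, .div], none, false, false, false, false),
  ([.add, .pow, .mul, .div, .sub], none, false, false, false, false),
  ([.add, .mul, .sub, .div, .pow], none, false, false, false, false),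
  ([.add, .mul, .sub, .pow, .div], none, false, false, false, false),
  ([.add, .mul, .div, .sub, .pow], none, false, false, false, false),
  ([.add, .mul, .div, .pow, .sub], none, false, false, false, false),
  ([.add, .mul, .pow, .sub, .div], none, false, false, false, false),
  ([.add, .mul, .pow, .div, .sub], none, false, false, false, false),
  ([.sub, .add, .div, .pow, .mul], none, false, false, false, false),
  ([.sub, .add, .div, .mul, .pow], none, false, false, false, false),
  ([.sub, .add, .pow, .div, .mul], none, false, false, false, false),
  ([.sub, .add, .pow, .mul, .div], none, false, false, false, false),
  ([.sub, .add, .mul, .div, .pow], none, false, false, false, false),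
  ([.sub, .add, .mul, .pow, .div], none, false, false, false, false),
  ([.sub, .div, .add, .pow, .mul], none, false, false, false, false),
  ([.sub, .div, .add, .mul, .pow], none, false, false, false, false),
  ([.sub, .div, .pow, .add, .mul], none, false, false, false, false),
  ([.sub, .div, .pow, .mul, .add], none, false, false, false, false),
  ([.sub, .div, .mul, .add, .pow], none, false, false, false, false),
  ([.sub, .div, .mul, .pow, .add], none, false, false, false, false),
  ([.sub, .pow, .add, .div, .mul], none, false, false, false, false),
  ([.sub, .pow, .add, .mul, .div], none, false, false, false, false),
  ([.sub, .pow, .div, .add, .mul], none, false, false, false, false),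
  ([.sub, .pow, .div, .mul, .add], none, false, false, false, false),
  ([.sub, .pow, .mul, .add, .div], none, false, false, false, false),
  ([.sub, .pow, .mul, .div, .add], none, false, false, false, false),
  ([.sub, .mul, .add, .div, .pow], none, false, false, false, false),
  ([.sub, .mul, .add, .pow, .div], none, false, false, false, false),
  ([.sub, .mul, .div, .add, .pow], none, false, false, false, false),
  ([.sub, .mul, .div, .pow, .add], none, false, false, false, false),
  ([.sub, .mul, .pow, .add, .div], none, false, false, false, false),
  ([.sub, .mul, .pow, .div, .add], none, false, false, false, false),
  ([.div, .add, .sub, .pow, .mul], none, false, false, false, false),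
  ([.div, .add, .sub, .mul, .pow], none, false, false, false, false),
  ([.div, .add, .pow, .sub, .mul], none, false, false, false, false),
  ([.div, .add, .pow, .mul, .sub], none, false, false, false, false),
  ([.div, .add, .mul, .sub, .pow], none, false, false, false, false),
  ([.div, .add, .mul, .pow, .sub], none, false, false, false, false),
  ([.div, .sub, .add, .pow, .mul], none, false, false, false, false),
  ([.div, .sub, .add, .mul, .pow], none, false, false, false, false),
  ([.div, .sub, .pow, .add, .mul], none, false, false, false, false),
  ([.div, .sub, .pow, .mul, .add], none, false, false, false, false),
  ([.div, .sub, .mul, .add, .pow], none, false, false, false, false),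
  ([.div, .sub, .mul, .pow, .add], none, false, false, false, false),
  ([.div, .pow, .add, .sub, .mul], none, false, false, false, false),
  ([.div, .pow, .add, .mul, .sub], none, false, false, false, false),
  ([.div, .pow, .sub, .add, .mul], none, false, false, false, false),
  ([.div, .pow, .sub, .mul, .add], none, false, false, false, false),
  ([.div, .pow, .mul, .add, .sub], some .mul, true, true, false, false),
  ([.div, .pow, .mul, .add, .sub], some .mul, true, true, false, true),
  ([.div, .pow, .mul, .add, .sub], none, false, true, false, false),
  ([.div, .pow, .mul, .add, .sub], none, false, true, false, true),
  ([.div, .pow, .mul, .sub, .add], some .mul, true, true, false, false),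
  ([.div, .pow, .mul, .sub, .add], some .mul, true, true, false, true),
  ([.div, .pow, .mul, .sub, .add], none, false, true, false, false),
  ([.div, .pow, .mul, .sub, .add], none, false, true, false, true),
  ([.div, .mul, .add, .sub, .pow], none, false, false, false, false),
  ([.div, .mul, .add, .pow, .sub], none, false, false, false, false),
  ([.div, .mul, .sub, .add, .pow], none, false, false, false, false),
  ([.div, .mul, .sub, .pow, .add], none, false, false, false, false),
  ([.div, .mul, .pow, .add, .sub], none, false, false, false, false),
  ([.div, .mul, .pow, .add, .sub], none, false, false, false, true),
  ([.div, .mul, .pow, .add, .sub], none, false, true, false, false),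
  ([.div, .mul, .pow, .add, .sub], none, false, true, false, true),
  ([.div, .mul, .pow, .sub, .add], none, false, false, false, false),
  ([.div, .mul, .pow, .sub, .add], none, false, false, false, true),
  ([.div, .mul, .pow, .sub, .add], none, false, true, false, false),
  ([.div, .mul, .pow, .sub, .add], none, false, true, false, true),
  ([.pow, .add, .sub, .div, .mul], none, false, false, false, false),
  ([.pow, .add, .sub, .mul, .div], none, false, false, false, false),
  ([.pow, .add, .div, .sub, .mul], none, false, false, false, false),
  ([.pow, .add, .div, .mul, .sub], none, false, false, false, false),
  ([.pow, .add, .mul, .sub, .div], none, false, false, false, false),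
  ([.pow, .add, .mul, .div, .sub], none, false, false, false, false),
  ([.pow, .sub, .add, .div, .mul], none, false, false, false, false),
  ([.pow, .sub, .add, .mul, .div], none, false, false, false, false),
  ([.pow, .sub, .div, .add, .mul], none, false, false, false, false),
  ([.pow, .sub, .div, .mul, .add], none, false, false, false, false),
  ([.pow, .sub, .mul, .add, .div], none, false, false, false, false),
  ([.pow, .sub, .mul, .div, .add], none, false, false, false, false),
  ([.pow, .div, .add, .sub, .mul], none, false, false, false, false),
  ([.pow, .div, .add, .mul, .sub], none, false, false, false, false),
  ([.pow, .div, .sub, .add, .mul], none, false, false, false, false),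
  ([.pow, .div, .sub, .mul, .add], none, false, false, false, false),
  ([.pow, .div, .mul, .add, .sub], some .mul, true, true, false, false),
  ([.pow, .div, .mul, .add, .sub], some .mul, true, true, false, true),
  ([.pow, .div, .mul, .add, .sub], none, false, true, false, false),
  ([.pow, .div, .mul, .add, .sub], none, false, true, false, true),
  ([.pow, .div, .mul, .sub, .add], some .mul, true, true, false, false),
  ([.pow, .div, .mul, .sub, .add], some .mul, true, true, false, true),
  ([.pow, .div, .mul, .sub, .add], none, false, true, false, false),
  ([.pow, .div, .mul, .sub, .add], none, false, true, false, true),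
  ([.pow, .mul, .add, .sub, .div], none, false, false, false, false),
  ([.pow, .mul, .add, .div, .sub], none, false, false, false, false),
  ([.pow, .mul, .sub, .add, .div], none, false, false, false, false),
  ([.pow, .mul, .sub, .div, .add], none, false, false, false, false),
  ([.pow, .mul, .div, .add, .sub], some .div, false, false, true, true),
  ([.pow, .mul, .div, .add, .sub], some .div, false, true, true, true),
  ([.pow, .mul, .div, .add, .sub], none, false, false, false, true),
  ([.pow, .mul, .div, .add, .sub], none, false, true, false, true),
  ([.pow, .mul, .div, .sub, .add], some .div, false, false, true, true),
  ([.pow, .mul, .div, .sub, .add], some .div, false, true, true, true),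
  ([.pow, .mul, .div, .sub, .add], none, false, false, false, true),
  ([.pow, .mul, .div, .sub, .add], none, false, true, false, true),
  ([.mul, .add, .sub, .div, .pow], none, false, false, false, false),
  ([.mul, .add, .sub, .pow, .div], none, false, false, false, false),
  ([.mul, .add, .div, .sub, .pow], none, false, false, false, false),
  ([.mul, .add, .div, .pow, .sub], none, false, false, false, false),
  ([.mul, .add, .pow, .sub, .div], none, false, false, false, false),
  ([.mul, .add, .pow, .div, .sub], none, false, false, false, false),
  ([.mul, .sub, .add, .div, .pow], none, false, false, false, false),
  ([.mul, .sub, .add, .pow, .div], none, false, false, false, false),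
  ([.mul, .sub, .div, .add, .pow], none, false, false, false, false),
  ([.mul, .sub, .div, .pow, .add], none, false, false, false, false),
  ([.mul, .sub, .pow, .add, .div], none, false, false, false, false),
  ([.mul, .sub, .pow, .div, .add], none, false, false, false, false),
  ([.mul, .div, .add, .sub, .pow], none, false, false, false, false),
  ([.mul, .div, .add, .pow, .sub], none, false, false, false, false),
  ([.mul, .div, .sub, .add, .pow], none, false, false, false, false),
  ([.mul, .div, .sub, .pow, .add], none, false, false, false, false),
  ([.mul, .div, .pow, .add, .sub], none, false, false, false, false),
  ([.mul, .div, .pow, .add, .sub], none, false, false, false, true),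
  ([.mul, .div, .pow, .add, .sub], none, false, true, false, false),
  ([.mul, .div, .pow, .add, .sub], none, false, true, false, true),
  ([.mul, .div, .pow, .sub, .add], none, false, false, false, false),
  ([.mul, .div, .pow, .sub, .add], none, false, false, false, true),
  ([.mul, .div, .pow, .sub, .add], none, false, true, false, false),
  ([.mul, .div, .pow, .sub, .add], none, false, true, false, true),
  ([.mul, .pow, .add, .sub, .div], none, false, false, false, false),
  ([.mul, .pow, .add, .div, .sub], none, false, false, false, false),
  ([.mul, .pow, .sub, .add, .div], none, false, false, false, false),
  ([.mul, .pow, .sub, .div, .add], none, false, false, false, false),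
  ([.mul, .pow, .div, .add, .sub], some .div, false, false, true, true),
  ([.mul, .pow, .div, .add, .sub], some .div, false, true, true, true),
  ([.mul, .pow, .div, .add, .sub], none, false, false, false, true),
  ([.mul, .pow, .div, .add, .sub], none, false, true, false, true),
  ([.mul, .pow, .div, .sub, .add], some .div, false, false, true, true),
  ([.mul, .pow, .div, .sub, .add], some .div, false, true, true, true),
  ([.mul, .pow, .div, .sub, .add], none, false, false, false, true),
  ([.mul, .pow, .div, .sub, .add], none, false, true, false, true)
]

def succTable : List (Nat × Nat × Nat × Nat × Nat) := [
  (4, 5, 3, 1, 2),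
  (8, 9, 7, 1, 6),
  (12, 13, 11, 10, 2),
  (16, 17, 3, 14, 15),
  (4, 21, 20, 18, 19),
  (25, 5, 24, 22, 23),
  (27, 28, 26, 6, 6),
  (30, 31, 7, 7, 29),
  (8, 34, 33, 8, 32),
  (37, 9, 36, 9, 35),
  (39, 40, 38, 10, 10),
  (42, 43, 11, 41, 11),
  (12, 46, 45, 44, 12),
  (49, 13, 48, 47, 13),
  (51, 52, 14, 14, 50),
  (54, 55, 15, 53, 15),
  (16, 58, 16, 56, 57),
  (62, 17, 17, 60, 61),
  (18, 68, 67, 18, 66),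
  (19, 71, 70, 69, 19),
  (20, 74, 20, 72, 73),
  (21, 21, 78, 76, 77),
  (82, 22, 81, 22, 80),
  (85, 23, 84, 83, 23),
  (88, 24, 24, 86, 87),
  (25, 25, 94, 92, 93),
  (96, 97, 26, 26, 26),
  (27, 99, 98, 27, 27),
  (101, 28, 100, 28, 28),
  (102, 103, 29, 29, 29),
  (30, 105, 30, 30, 104),
  (107, 31, 31, 31, 106),
  (32, 109, 108, 32, 32),
  (33, 111, 33, 33, 110),
  (34, 34, 113, 34, 112),
  (115, 35, 114, 35, 35),
  (117, 36, 36, 36, 116),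
  (37, 37, 119, 37, 118),
  (120, 121, 38, 38, 38),
  (39, 123, 122, 39, 39),
  (125, 40, 124, 40, 40),
  (126, 127, 41, 41, 41),
  (42, 129, 42, 128, 42),
  (131, 43, 43, 130, 43),
  (44, 133, 132, 44, 44),
  (45, 135, 45, 134, 45),
  (46, 46, 137, 136, 46),
  (139, 47, 138, 47, 47),
  (141, 48, 48, 140, 48),
  (49, 49, 143, 142, 49),
  (144, 145, 50, 50, 50),
  (51, 147, 51, 51, 146),
  (149, 52, 52, 52, 148),
  (150, 151, 53, 53, 53),
  (54, 153, 54, 152, 54),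
  (155, 55, 55, 154, 55),
  (56, 157, 56, 56, 156),
  (57, 159, 57, 158, 57),
  (58, 58, 59, 160, 164),
  (59, 59, 59, 161, 165),
  (169, 60, 60, 60, 168),
  (171, 61, 61, 170, 61),
  (62, 64, 63, 172, 176),
  (63, 65, 63, 173, 177),
  (64, 64, 65, 174, 178),
  (65, 65, 65, 175, 179),
  (66, 181, 180, 66, 66),
  (67, 183, 67, 67, 182),
  (68, 68, 185, 68, 184),
  (69, 187, 186, 69, 69),
  (70, 189, 70, 188, 70),
  (71, 71, 191, 190, 71),
  (72, 193, 72, 72, 192),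
  (73, 195, 73, 194, 73),
  (74, 74, 75, 196, 200),
  (75, 75, 75, 197, 201),
  (76, 76, 205, 76, 204),
  (77, 77, 207, 206, 77),
  (78, 79, 78, 208, 212),
  (79, 79, 79, 209, 213),
  (217, 80, 216, 80, 80),
  (219, 81, 81, 81, 218),
  (82, 82, 221, 82, 220),
  (223, 83, 222, 83, 83),
  (225, 84, 84, 224, 84),
  (85, 85, 227, 226, 85),
  (229, 86, 86, 86, 228),
  (231, 87, 87, 230, 87),
  (88, 90, 89, 232, 236),
  (89, 91, 89, 233, 237),
  (90, 90, 91, 234, 238),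
  (91, 91, 91, 235, 239),
  (92, 92, 241, 92, 240),
  (93, 93, 243, 242, 93),
  (94, 95, 94, 244, 248),
  (95, 95, 95, 245, 249),
  (96, 252, 96, 96, 96),
  (253, 97, 97, 97, 97),
  (98, 254, 98, 98, 98),
  (99, 99, 255, 99, 99),
  (256, 100, 100, 100, 100),
  (101, 101, 257, 101, 101),
  (102, 258, 102, 102, 102),
  (259, 103, 103, 103, 103),
  (104, 260, 104, 104, 104),
  (105, 105, 105, 105, 261),
  (262, 106, 106, 106, 106),
  (107, 107, 107, 107, 263),
  (108, 264, 108, 108, 108),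
  (109, 109, 265, 109, 109),
  (110, 266, 110, 110, 110),
  (111, 111, 111, 111, 267),
  (112, 112, 268, 112, 112),
  (113, 113, 113, 113, 269),
  (270, 114, 114, 114, 114),
  (115, 115, 271, 115, 115),
  (272, 116, 116, 116, 116),
  (117, 117, 117, 117, 273),
  (118, 118, 274, 118, 118),
  (119, 119, 119, 119, 275),
  (120, 276, 120, 120, 120),
  (277, 121, 121, 121, 121),
  (122, 278, 122, 122, 122),
  (123, 123, 279, 123, 123),
  (280, 124, 124, 124, 124),
  (125, 125, 281, 125, 125),
  (126, 282, 126, 126, 126),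
  (283, 127, 127, 127, 127),
  (128, 284, 128, 128, 128),
  (129, 129, 129, 285, 129),
  (286, 130, 130, 130, 130),
  (131, 131, 131, 287, 131),
  (132, 288, 132, 132, 132),
  (133, 133, 289, 133, 133),
  (134, 290, 134, 134, 134),
  (135, 135, 135, 291, 135),
  (136, 136, 292, 136, 136),
  (137, 137, 137, 293, 137),
  (294, 138, 138, 138, 138),
  (139, 139, 295, 139, 139),
  (296, 140, 140, 140, 140),
  (141, 141, 141, 297, 141),
  (142, 142, 298, 142, 142),
  (143, 143, 143, 299, 143),
  (144, 300, 144, 144, 144),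
  (301, 145, 145, 145, 145),
  (146, 302, 146, 146, 146),
  (147, 147, 147, 147, 303),
  (304, 148, 148, 148, 148),
  (149, 149, 149, 149, 305),
  (150, 306, 150, 150, 150),
  (307, 151, 151, 151, 151),
  (152, 308, 152, 152, 152),
  (153, 153, 153, 309, 153),
  (310, 154, 154, 154, 154),
  (155, 155, 155, 311, 155),
  (156, 312, 156, 156, 156),
  (157, 157, 157, 157, 313),
  (158, 314, 158, 158, 158),
  (159, 159, 159, 315, 159),
  (160, 162, 160, 160, 316),
  (161, 163, 161, 161, 317),
  (162, 162, 162, 162, 318),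
  (163, 163, 163, 163, 319),
  (164, 166, 164, 320, 164),
  (165, 167, 165, 321, 165),
  (166, 166, 166, 322, 166),
  (167, 167, 167, 323, 167),
  (324, 168, 168, 168, 168),
  (169, 169, 169, 169, 325),
  (326, 170, 170, 170, 170),
  (171, 171, 171, 327, 171),
  (172, 172, 172, 172, 328),
  (173, 173, 173, 173, 329),
  (174, 174, 174, 174, 330),
  (175, 175, 175, 175, 331),
  (176, 176, 176, 332, 176),
  (177, 177, 177, 333, 177),
  (178, 178, 178, 334, 178),
  (179, 179, 179, 335, 179),
  (180, 336, 180, 180, 180),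
  (181, 181, 337, 181, 181),
  (182, 338, 182, 182, 182),
  (183, 183, 183, 183, 339),
  (184, 184, 340, 184, 184),
  (185, 185, 185, 185, 341),
  (186, 342, 186, 186, 186),
  (187, 187, 343, 187, 187),
  (188, 344, 188, 188, 188),
  (189, 189, 189, 345, 189),
  (190, 190, 346, 190, 190),
  (191, 191, 191, 347, 191),
  (192, 348, 192, 192, 192),
  (193, 193, 193, 193, 349),
  (194, 350, 194, 194, 194),
  (195, 195, 195, 351, 195),
  (196, 198, 196, 196, 352),
  (197, 199, 197, 197, 353),
  (198, 198, 198, 198, 354),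
  (199, 199, 199, 199, 355),
  (200, 202, 200, 356, 200),
  (201, 203, 201, 357, 201),
  (202, 202, 202, 358, 202),
  (203, 203, 203, 359, 203),
  (204, 204, 360, 204, 204),
  (205, 205, 205, 205, 361),
  (206, 206, 362, 206, 206),
  (207, 207, 207, 363, 207),
  (208, 208, 210, 208, 364),
  (209, 209, 211, 209, 365),
  (210, 210, 210, 210, 366),
  (211, 211, 211, 211, 367),
  (212, 212, 214, 368, 212),
  (213, 213, 215, 369, 213),
  (214, 214, 214, 370, 214),
  (215, 215, 215, 371, 215),
  (372, 216, 216, 216, 216),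
  (217, 217, 373, 217, 217),
  (374, 218, 218, 218, 218),
  (219, 219, 219, 219, 375),
  (220, 220, 376, 220, 220),
  (221, 221, 221, 221, 377),
  (378, 222, 222, 222, 222),
  (223, 223, 379, 223, 223),
  (380, 224, 224, 224, 224),
  (225, 225, 225, 381, 225),
  (226, 226, 382, 226, 226),
  (227, 227, 227, 383, 227),
  (384, 228, 228, 228, 228),
  (229, 229, 229, 229, 385),
  (386, 230, 230, 230, 230),
  (231, 231, 231, 387, 231),
  (232, 232, 232, 232, 388),
  (233, 233, 233, 233, 389),
  (234, 234, 234, 234, 390),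
  (235, 235, 235, 235, 391),
  (236, 236, 236, 392, 236),
  (237, 237, 237, 393, 237),
  (238, 238, 238, 394, 238),
  (239, 239, 239, 395, 239),
  (240, 240, 396, 240, 240),
  (241, 241, 241, 241, 397),
  (242, 242, 398, 242, 242),
  (243, 243, 243, 399, 243),
  (244, 244, 246, 244, 400),
  (245, 245, 247, 245, 401),
  (246, 246, 246, 246, 402),
  (247, 247, 247, 247, 403),
  (248, 248, 250, 404, 248),
  (249, 249, 251, 405, 249),
  (250, 250, 250, 406, 250),
  (251, 251, 251, 407, 251),
  (252, 252, 252, 252, 252),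
  (253, 253, 253, 253, 253),
  (254, 254, 254, 254, 254),
  (255, 255, 255, 255, 255),
  (256, 256, 256, 256, 256),
  (257, 257, 257, 257, 257),
  (258, 258, 258, 258, 258),
  (259, 259, 259, 259, 259),
  (260, 260, 260, 260, 260),
  (261, 261, 261, 261, 261),
  (262, 262, 262, 262, 262),
  (263, 263, 263, 263, 263),
  (264, 264, 264, 264, 264),
  (265, 265, 265, 265, 265),
  (266, 266, 266, 266, 266),
  (267, 267, 267, 267, 267),
  (268, 268, 268, 268, 268),
  (269, 269, 269, 269, 269),
  (270, 270, 270, 270, 270),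
  (271, 271, 271, 271, 271),
  (272, 272, 272, 272, 272),
  (273, 273, 273, 273, 273),
  (274, 274, 274, 274, 274),
  (275, 275, 275, 275, 275),
  (276, 276, 276, 276, 276),
  (277, 277, 277, 277, 277),
  (278, 278, 278, 278, 278),
  (279, 279, 279, 279, 279),
  (280, 280, 280, 280, 280),
  (281, 281, 281, 281, 281),
  (282, 282, 282, 282, 282),
  (283, 283, 283, 283, 283),
  (284, 284, 284, 284, 284),
  (285, 285, 285, 285, 285),
  (286, 286, 286, 286, 286),
  (287, 287, 287, 287, 287),
  (288, 288, 288, 288, 288),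
  (289, 289, 289, 289, 289),
  (290, 290, 290, 290, 290),
  (291, 291, 291, 291, 291),
  (292, 292, 292, 292, 292),
  (293, 293, 293, 293, 293),
  (294, 294, 294, 294, 294),
  (295, 295, 295, 295, 295),
  (296, 296, 296, 296, 296),
  (297, 297, 297, 297, 297),
  (298, 298, 298, 298, 298),
  (299, 299, 299, 299, 299),
  (300, 300, 300, 300, 300),
  (301, 301, 301, 301, 301),
  (302, 302, 302, 302, 302),
  (303, 303, 303, 303, 303),
  (304, 304, 304, 304, 304),
  (305, 305, 305, 305, 305),
  (306, 306, 306, 306, 306),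
  (307, 307, 307, 307, 307),
  (308, 308, 308, 308, 308),
  (309, 309, 309, 309, 309),
  (310, 310, 310, 310, 310),
  (311, 311, 311, 311, 311),
  (312, 312, 312, 312, 312),
  (313, 313, 313, 313, 313),
  (314, 314, 314, 314, 314),
  (315, 315, 315, 315, 315),
  (316, 318, 316, 316, 316),
  (317, 319, 317, 317, 317),
  (318, 318, 318, 318, 318),
  (319, 319, 319, 319, 319),
  (320, 322, 320, 320, 320),
  (321, 323, 321, 321, 321),
  (322, 322, 322, 322, 322),
  (323, 323, 323, 323, 323),
  (324, 324, 324, 324, 324),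
  (325, 325, 325, 325, 325),
  (326, 326, 326, 326, 326),
  (327, 327, 327, 327, 327),
  (328, 328, 328, 328, 328),
  (329, 329, 329, 329, 329),
  (330, 330, 330, 330, 330),
  (331, 331, 331, 331, 331),
  (332, 332, 332, 332, 332),
  (333, 333, 333, 333, 333),
  (334, 334, 334, 334, 334),
  (335, 335, 335, 335, 335),
  (336, 336, 336, 336, 336),
  (337, 337, 337, 337, 337),
  (338, 338, 338, 338, 338),
  (339, 339, 339, 339, 339),
  (340, 340, 340, 340, 340),
  (341, 341, 341, 341, 341),
  (342, 342, 342, 342, 342),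
  (343, 343, 343, 343, 343),
  (344, 344, 344, 344, 344),
  (345, 345, 345, 345, 345),
  (346, 346, 346, 346, 346),
  (347, 347, 347, 347, 347),
  (348, 348, 348, 348, 348),
  (349, 349, 349, 349, 349),
  (350, 350, 350, 350, 350),
  (351, 351, 351, 351, 351),
  (352, 354, 352, 352, 352),
  (353, 355, 353, 353, 353),
  (354, 354, 354, 354, 354),
  (355, 355, 355, 355, 355),
  (356, 358, 356, 356, 356),
  (357, 359, 357, 357, 357),
  (358, 358, 358, 358, 358),
  (359, 359, 359, 359, 359),
  (360, 360, 360, 360, 360),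
  (361, 361, 361, 361, 361),
  (362, 362, 362, 362, 362),
  (363, 363, 363, 363, 363),
  (364, 364, 366, 364, 364),
  (365, 365, 367, 365, 365),
  (366, 366, 366, 366, 366),
  (367, 367, 367, 367, 367),
  (368, 368, 370, 368, 368),
  (369, 369, 371, 369, 369),
  (370, 370, 370, 370, 370),
  (371, 371, 371, 371, 371),
  (372, 372, 372, 372, 372),
  (373, 373, 373, 373, 373),
  (374, 374, 374, 374, 374),
  (375, 375, 375, 375, 375),
  (376, 376, 376, 376, 376),
  (377, 377, 377, 377, 377),
  (378, 378, 378, 378, 378),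
  (379, 379, 379, 379, 379),
  (380, 380, 380, 380, 380),
  (381, 381, 381, 381, 381),
  (382, 382, 382, 382, 382),
  (383, 383, 383, 383, 383),
  (384, 384, 384, 384, 384),
  (385, 385, 385, 385, 385),
  (386, 386, 386, 386, 386),
  (387, 387, 387, 387, 387),
  (388, 388, 388, 388, 388),
  (389, 389, 389, 389, 389),
  (390, 390, 390, 390, 390),
  (391, 391, 391, 391, 391),
  (392, 392, 392, 392, 392),
  (393, 393, 393, 393, 393),
  (394, 394, 394, 394, 394),
  (395, 395, 395, 395, 395),
  (396, 396, 396, 396, 396),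
  (397, 397, 397, 397, 397),
  (398, 398, 398, 398, 398),
  (399, 399, 399, 399, 399),
  (400, 400, 402, 400, 400),
  (401, 401, 403, 401, 401),
  (402, 402, 402, 402, 402),
  (403, 403, 403, 403, 403),
  (404, 404, 406, 404, 404),
  (405, 405, 407, 405, 405),
  (406, 406, 406, 406, 406),
  (407, 407, 407, 407, 407)
]

def pvInit : PvState := ([], none, true, false, true, false)

def stepOKb (s : PvState) (u : PvOp) : Bool :=
  decide (stepA (opsOf s) (PvOp.toStr u) = opsOf (stepF s u)) &&
  decide (bstep (seenStrOf s) (PvOp.toStr u) = seenStrOf (stepF s u)) &&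
  decide (adStep "x" (flagsX s) (PvOp.toStr u) = flagsX (stepF s u)) &&
  decide (adStep "/" (flagsD s) (PvOp.toStr u) = flagsD (stepF s u))

def chkSucc (s : PvState) (u : PvOp) (j : Nat) : Bool := ReachL.getD j pvInit == stepF s u

def invOKb (s : PvState) : Bool :=
  decide (s.2.1 = none ∨ s.2.1 = some .mul ∨ s.2.1 = some .div) &&
  (!(s.2.2.1 && s.2.2.2.1) || decide (s.2.1 = some .mul)) &&
  (!(s.2.2.2.2.1 && s.2.2.2.2.2) || decide (s.2.1 = some .div)) &&
  (!(decide (s.2.1 = some .mul)) || (s.2.2.1 && s.2.2.2.1)) &&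
  (!(decide (s.2.1 = some .div)) || (s.2.2.2.2.1 && s.2.2.2.2.2)) &&
  (match s.2.1 with | some t => s.1.contains t | none => true)

set_option maxRecDepth 10000 in
set_option maxHeartbeats 4000000 in
theorem allOK : ∀ s ∈ ReachL, ∀ u ∈ allOpsE, stepOKb s u = true := by decide

set_option maxRecDepth 10000 in
set_option maxHeartbeats 4000000 in
theorem closureOK : (ReachL.zip succTable).all
    (fun p => chkSucc p.1 .pow p.2.1 && chkSucc p.1 .mul p.2.2.1 && chkSucc p.1 .div p.2.2.2.1 &&
      chkSucc p.1 .add p.2.2.2.2.1 && chkSucc p.1 .sub p.2.2.2.2.2) = true := by decide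

set_option maxRecDepth 10000 in
set_option maxHeartbeats 2000000 in
theorem allInv : ∀ s ∈ ReachL, invOKb s = true := by decide

set_option maxRecDepth 10000 in
theorem init_mem : pvInit ∈ ReachL := by decide

theorem mem_of_chkSucc (s : PvState) (u : PvOp) (j : Nat) (h : chkSucc s u j = true) :
    stepF s u ∈ ReachL := by
  have he : ReachL.getD j pvInit = stepF s u := by simpa [chkSucc] using h
  rw [← he, List.getD_eq_getElem?_getD]
  cases hj : ReachL[j]? with
  | none => simpa [hj] using init_mem
  | some x => simpa [hj] using List.mem_of_getElem? hj

set_option maxRecDepth 10000 in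
theorem stepF_mem : ∀ s ∈ ReachL, ∀ u ∈ allOpsE, stepF s u ∈ ReachL := by
  intro s hs u hu
  obtain ⟨i, hi, hEq⟩ := List.mem_iff_getElem.mp hs
  have hlen : ReachL.length = succTable.length := by decide
  have hik : i < (ReachL.zip succTable).length := by rw [List.length_zip]; omega
  have hzip : (ReachL[i], succTable[i]) ∈ ReachL.zip succTable := by
    have hm := List.getElem_mem hik
    rwa [List.getElem_zip] at hm
  have hall := List.all_eq_true.mp closureOK _ hzip
  simp only [Bool.and_eq_true] at hall
  obtain ⟨⟨⟨⟨cp, cm⟩, cd⟩, ca⟩, cs⟩ := hall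
  subst hEq
  simp only [allOpsE, List.mem_cons, List.not_mem_nil, or_false] at hu
  rcases hu with rfl | rfl | rfl | rfl | rfl
  · exact mem_of_chkSucc _ _ _ cp
  · exact mem_of_chkSucc _ _ _ cm
  · exact mem_of_chkSucc _ _ _ cd
  · exact mem_of_chkSucc _ _ _ ca
  · exact mem_of_chkSucc _ _ _ cs

theorem stepOK_props (s : PvState) (u : PvOp) (hs : s ∈ ReachL) (hu : u ∈ allOpsE)
    (h : stepOKb s u = true) :
    stepA (opsOf s) (PvOp.toStr u) = opsOf (stepF s u) ∧
    bstep (seenStrOf s) (PvOp.toStr u) = seenStrOf (stepF s u) ∧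
    adStep "x" (flagsX s) (PvOp.toStr u) = flagsX (stepF s u) ∧
    adStep "/" (flagsD s) (PvOp.toStr u) = flagsD (stepF s u) ∧
    stepF s u ∈ ReachL := by
  simp only [stepOKb, Bool.and_eq_true, decide_eq_true_eq] at h
  exact ⟨h.1.1.1, h.1.1.2, h.1.2, h.2, stepF_mem s hs u hu⟩

theorem inv_props (s : PvState) (h : invOKb s = true) :
    (s.2.1 = none ∨ s.2.1 = some .mul ∨ s.2.1 = some .div) ∧
    ((s.2.2.1 && s.2.2.2.1) = true → s.2.1 = some .mul) ∧
    ((s.2.2.2.2.1 && s.2.2.2.2.2) = true → s.2.1 = some .div) ∧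
    (s.2.1 = some .mul → (s.2.2.1 && s.2.2.2.1) = true) ∧
    (s.2.1 = some .div → (s.2.2.2.2.1 && s.2.2.2.2.2) = true) ∧
    (∀ t, s.2.1 = some t → t ∈ s.1) := by
  simp only [invOKb, Bool.and_eq_true, Bool.or_eq_true, Bool.not_eq_eq_eq_not, Bool.not_true,
    decide_eq_true_eq] at h
  obtain ⟨⟨⟨⟨⟨c1, c2⟩, c3⟩, c4⟩, c5⟩, c6⟩ := h
  refine ⟨c1, ?_, ?_, ?_, ?_, ?_⟩
  · intro hb; rcases c2 with h' | h'
    · rw [hb] at h'; cases h'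
    · exact h'
  · intro hb; rcases c3 with h' | h'
    · rw [hb] at h'; cases h'
    · exact h'
  · intro hp; rcases c4 with h' | h'
    · exact absurd hp (by simpa using h')
    · exact Bool.and_eq_true_iff.mpr h'
  · intro hp; rcases c5 with h' | h'
    · exact absurd hp (by simpa using h')
    · exact Bool.and_eq_true_iff.mpr h'
  · intro t ht
    rw [ht] at c6
    simpa using c6

theorem notOp_stepA (ops : List String) (u : String) (h : u ∉ OPERATIONS) :
    stepA ops u = ops := by
  simp [stepA, h]

theorem notOp_bstep (seen : List String) (u : String) (h : u ∉ OPERATIONS) :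
    bstep seen u = seen := by
  simp [bstep, h]

theorem notOp_strings (u : String) (h : u ∉ OPERATIONS) :
    u ≠ "^" ∧ u ≠ "x" ∧ u ≠ "/" ∧ u ≠ "+" ∧ u ≠ "-" := by
  simp [OPERATIONS] at h; exact h

theorem notOp_adStep (t : String) (fl : Bool × Bool × Bool × Bool × Bool) (u : String)
    (ht : t = "x" ∨ t = "/") (h : u ∉ OPERATIONS) : adStep t fl u = fl := by
  obtain ⟨h1, h2, h3, h4, h5⟩ := notOp_strings u h
  have e1 : (u == "^") = false := by simp [h1]
  have e2 : (u == "x") = false := by simp [h2]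
  have e3 : (u == "/") = false := by simp [h3]
  have e4 : (u == "+") = false := by simp [h4]
  have e5 : (u == "-") = false := by simp [h5]
  rcases ht with rfl | rfl <;>
    simp [adStep, otherOf, h2, h3, e1, e2, e3, e4, e5]

theorem notOp_stepFS (s : PvState) (u : String) (h : u ∉ OPERATIONS) : stepFS s u = s := by
  obtain ⟨h1, h2, h3, h4, h5⟩ := notOp_strings u h
  simp [stepFS, toOp?, h1, h2, h3, h4, h5]

-- the main simulation: A's fold, B's collecting fold and both drop-scans all follow the machine
theorem ML : ∀ (tokens : List String) (s : PvState), s ∈ ReachL →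
    List.foldl stepA (opsOf s) tokens = opsOf (List.foldl stepFS s tokens) ∧
    List.foldl bstep (seenStrOf s) tokens = seenStrOf (List.foldl stepFS s tokens) ∧
    List.foldl (adStep "x") (flagsX s) tokens = flagsX (List.foldl stepFS s tokens) ∧
    List.foldl (adStep "/") (flagsD s) tokens = flagsD (List.foldl stepFS s tokens) ∧
    List.foldl stepFS s tokens ∈ ReachL := by
  intro tokens
  induction tokens with
  | nil => intro s hs; exact ⟨rfl, rfl, rfl, rfl, hs⟩
  | cons u rest ih =>
    intro s hs
    by_cases hu : u ∈ OPERATIONS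
    · have hcase : u = "^" ∨ u = "x" ∨ u = "/" ∨ u = "+" ∨ u = "-" := by
        simpa [OPERATIONS] using hu
      have key : stepA (opsOf s) u = opsOf (stepFS s u) ∧
          bstep (seenStrOf s) u = seenStrOf (stepFS s u) ∧
          adStep "x" (flagsX s) u = flagsX (stepFS s u) ∧
          adStep "/" (flagsD s) u = flagsD (stepFS s u) ∧
          stepFS s u ∈ ReachL := by
        rcases hcase with rfl | rfl | rfl | rfl | rfl
        · simpa [stepFS, toOp?] using stepOK_props s .pow hs (by decide) (allOK s hs .pow (by decide))
        · simpa [stepFS, toOp?] using stepOK_props s .mul hs (by decide) (allOK s hs .mul (by decide))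
        · simpa [stepFS, toOp?] using stepOK_props s .div hs (by decide) (allOK s hs .div (by decide))
        · simpa [stepFS, toOp?] using stepOK_props s .add hs (by decide) (allOK s hs .add (by decide))
        · simpa [stepFS, toOp?] using stepOK_props s .sub hs (by decide) (allOK s hs .sub (by decide))
      obtain ⟨k1, k2, k3, k4, k5⟩ := key
      obtain ⟨r1, r2, r3, r4, r5⟩ := ih (stepFS s u) k5
      refine ⟨?_, ?_, ?_, ?_, ?_⟩ <;>
        simp [List.foldl_cons, k1, k2, k3, k4, r1, r2, r3, r4, r5]
    · obtain ⟨r1, r2, r3, r4, r5⟩ := ih s hs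
      refine ⟨?_, ?_, ?_, ?_, ?_⟩ <;>
        simp [List.foldl_cons, notOp_stepA _ _ hu, notOp_bstep _ _ hu,
          notOp_adStep _ _ _ (Or.inl rfl) hu, notOp_adStep _ _ _ (Or.inr rfl) hu,
          notOp_stepFS _ _ hu, r1, r2, r3, r4, r5]

theorem final_facts (tokens : List String) :
    get_ops tokens = opsOf (List.foldl stepFS pvInit tokens) ∧
    get_ops_alt tokens =
      PySem.List.sorted (seenStrOf (List.foldl stepFS pvInit tokens)) prec false ∧
    dropped "x" tokens = ((flagsX (List.foldl stepFS pvInit tokens)).2.2.2.1 &&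
      (flagsX (List.foldl stepFS pvInit tokens)).2.2.2.2) ∧
    dropped "/" tokens = ((flagsD (List.foldl stepFS pvInit tokens)).2.2.2.1 &&
      (flagsD (List.foldl stepFS pvInit tokens)).2.2.2.2) ∧
    List.foldl stepFS pvInit tokens ∈ ReachL := by
  obtain ⟨h1, h2, h3, h4, h5⟩ := ML tokens pvInit init_mem
  have e1 : opsOf pvInit = ([] : List String) := by decide
  have e2 : seenStrOf pvInit = ([] : List String) := rfl
  have e3 : flagsX pvInit = (false, false, false, true, false) := rfl
  have e4 : flagsD pvInit = (false, false, false, true, false) := rfl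
  rw [e1] at h1; rw [e2] at h2; rw [e3] at h3; rw [e4] at h4
  refine ⟨h1, ?_, ?_, ?_, h5⟩
  · simp only [get_ops_alt, h2]
  · simp only [dropped, h3]
  · simp only [dropped, h4]

-- ===== VERDICT (by name: the statement is the Claim_ definition above) =====
theorem get_ops_spec : Claim_unchanged_get_ops := by
  intro tokens _ hD
  obtain ⟨h1, h2, h3, h4, h5⟩ := final_facts tokens
  set F := List.foldl stepFS pvInit tokens with hF
  obtain ⟨ipend, _, _, ixr, idr, _⟩ := inv_props F (allInv F h5)
  have hx : ¬ (dropped "x" tokens = true) := fun h => hD (Or.inl h)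
  have hd : ¬ (dropped "/" tokens = true) := fun h => hD (Or.inr h)
  rw [h3] at hx; rw [h4] at hd
  simp only [flagsX, flagsD] at hx hd
  have hpend : F.2.1 = none := by
    rcases ipend with h | h | h
    · exact h
    · exact absurd (ixr h) hx
    · exact absurd (idr h) hd
  rw [h1, h2]
  simp [opsOf, hpend, seenStrOf]

theorem get_ops_changed : Claim_changed_get_ops := by
  unfold Claim_changed_get_ops; decide

theorem get_ops_tight : Claim_exact_get_ops := by
  intro tokens _ hD heq
  obtain ⟨h1, h2, h3, h4, h5⟩ := final_facts tokens
  set F := List.foldl stepFS pvInit tokens with hF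
  obtain ⟨_, ix, id', _, _, imem⟩ := inv_props F (allInv F h5)
  simp only [flagsX, flagsD] at h3 h4
  have hpend : ∃ t, F.2.1 = some t ∧ t ∈ F.1 := by
    rcases hD with h | h
    · rw [h3] at h; exact ⟨.mul, ix h, imem _ (ix h)⟩
    · rw [h4] at h; exact ⟨.div, id' h, imem _ (id' h)⟩
  obtain ⟨t, hp, hmem⟩ := hpend
  rw [h1, h2] at heq
  have hlen := congrArg List.length heq
  rw [opsOf, hp] at hlen
  have hm : (match some t with | some t => F.1.erase t | none => F.1) = F.1.erase t := rfl
  rw [hm] at hlen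
  simp only [PySem.List.length_sorted, seenStrOf, List.length_map,
    List.length_erase_of_mem hmem] at hlen
  have hpos : 0 < F.1.length := List.length_pos_of_mem hmem
  omega
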